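-- pv_equiv track=rewrite | github.com/swsilver95/TIL | algorithm/BOJ/BOJ10773_제로_S4.py | jaemin
-- ===== SOURCE A (Python) =====
-- def jaemin(numbers):
--     stk = []
--     for number in numbers:
--         if number != 0:
--             stk.append(number)
--         else:
--             stk.pop()
--     return sum(stk)
-- ===== SOURCE B (Python) =====
-- def jaemin(numbers):
--     total = 0
--     pending = 0
--     for number in reversed(numbers):
--         if number == 0:
--             pending += 1
--         elif pending:
--             pending -= 1
--         else:
--             total += number
--     return total
-- ===== Notes on version B (the rewrite author's own statement) =====
-- stated objective: alternative
-- what changed: B eliminates the stack entirely: a single reverse scan with only a pending-zeros counter (each zero cancels the nearest earlier not-yet-cancelled nonzero) sums the surviving values in O(1) extra space.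
import Mathlib
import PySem

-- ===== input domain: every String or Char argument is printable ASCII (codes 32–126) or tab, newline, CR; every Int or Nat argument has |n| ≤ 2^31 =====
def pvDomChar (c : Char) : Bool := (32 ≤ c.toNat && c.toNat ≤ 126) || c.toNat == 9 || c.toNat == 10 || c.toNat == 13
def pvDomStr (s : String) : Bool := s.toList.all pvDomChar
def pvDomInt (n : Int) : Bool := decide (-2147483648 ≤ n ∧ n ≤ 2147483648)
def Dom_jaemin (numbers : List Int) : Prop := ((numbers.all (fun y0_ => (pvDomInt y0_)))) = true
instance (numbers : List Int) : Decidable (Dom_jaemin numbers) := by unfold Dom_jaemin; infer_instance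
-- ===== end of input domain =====

-- B replaces A's stack with a single reverse scan keeping only a pending-zeros counter; same time, O(1) space; A's IndexError inputs are excluded by Pre_.


-- ===== PORT A =====
-- stk.pop() on an empty stack raises IndexError in Python; those inputs are excluded
-- by Pre_jaemin, so dropLast's value on [] is never reached on admitted inputs.
def jaemin (numbers : List Int) : Int :=
  (numbers.foldl
    (fun stk number => if number ≠ 0 then stk ++ [number] else stk.dropLast)
    []).sum

-- ===== PORT B =====
-- reversed(numbers) scan with state (total, pending); 'elif pending' = pending ≠ 0.
def jaemin_alt (numbers : List Int) : Int :=
  (numbers.reverse.foldl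
    (fun st number =>
      if number = 0 then (st.1, st.2 + 1)
      else if st.2 ≠ 0 then (st.1, st.2 - 1)
      else (st.1 + number, st.2))
    ((0 : Int), (0 : Int))).1

-- ===== PRECONDITION & SPEC =====
-- Pre_ excludes exactly the inputs where a zero arrives with an empty stack, on which
-- Python A raises IndexError: every zero at position i must be preceded by strictly
-- more non-zeros than zeros (2 * zeros < prefix length).
def Pre_jaemin (numbers : List Int) : Prop :=
  ∀ i < numbers.length, numbers.getD i 1 = 0 → 2 * (numbers.take i).count 0 < i

instance (numbers : List Int) : Decidable (Pre_jaemin numbers) := by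
  unfold Pre_jaemin; infer_instance

def pvWitness_jaemin : List Int := [1, 4, 0, 2]

def Spec_jaemin (numbers : List Int) (out : Int) : Prop := out = jaemin_alt numbers
instance (numbers : List Int) (out : Int) : Decidable (Spec_jaemin numbers out) := by unfold Spec_jaemin; infer_instance

-- ===== CLAIM (what is proved, stated in full; the proofs are below) =====
def Claim_equal_jaemin : Prop := ∀ (numbers : List Int), Dom_jaemin numbers → Pre_jaemin numbers → Spec_jaemin numbers (jaemin numbers)

-- ===== LEMMAS AND PROOFS =====

-- A's stack as a standalone fold (definitionally the stack inside jaemin)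
def stkOf (l : List Int) : List Int :=
  l.foldl (fun stk number => if number ≠ 0 then stk ++ [number] else stk.dropLast) []

theorem jaemin_eq_sum (l : List Int) : jaemin l = (stkOf l).sum := rfl

theorem pre_append (m : List Int) (a : Int) (h : Pre_jaemin (m ++ [a])) :
    Pre_jaemin m := by
  intro i hi hz
  have h2 := h i (by simp; omega)
  rw [List.getD, List.getElem?_append_left hi, ← List.getD] at h2
  have ht : (m ++ [a]).take i = m.take i :=
    List.take_append_of_le_length (le_of_lt hi)
  rw [ht] at h2
  exact h2 hz

theorem pre_last_zero (m : List Int) (h : Pre_jaemin (m ++ [0])) :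
    2 * m.count 0 < m.length := by
  have h2 := h m.length (by simp)
  simp only [List.getD, List.getElem?_concat_length, Option.getD_some] at h2
  have ht : (m ++ [0]).take m.length = m := by
    rw [List.take_append_of_le_length (le_refl _), List.take_length]
  rw [ht] at h2
  exact h2 trivial

-- Core invariant: for a valid list, the reverse counter scan from (t, p) adds the sum
-- of the stack minus its top p elements, and leaves pending p minus the stack length.
theorem main_inv (l : List Int) (hPre : Pre_jaemin l) :
    ((stkOf l).length : Int) = l.length - 2 * l.count 0 ∧
    ∀ (t : Int) (p : Nat),
      l.foldr
        (fun number st =>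
          if number = 0 then (st.1, st.2 + 1)
          else if st.2 ≠ 0 then (st.1, st.2 - 1)
          else (st.1 + number, st.2))
        (t, (p : Int))
      = (t + ((stkOf l).take ((stkOf l).length - p)).sum,
         ((p - (stkOf l).length : Nat) : Int)) := by
  induction l using List.reverseRecOn with
  | nil => refine ⟨by simp [stkOf], ?_⟩; intro t p; simp [stkOf]
  | append_singleton m a ih =>
    obtain ⟨ihlen, ihscan⟩ := ih (pre_append m a hPre)
    have hstk : stkOf (m ++ [a]) =
        if a ≠ 0 then stkOf m ++ [a] else (stkOf m).dropLast := by
      simp [stkOf, List.foldl_append]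
    have hl : (m ++ [a]).length = m.length + 1 := by simp
    by_cases ha : a = 0
    · -- zero: stack pops; scan increments pending
      subst ha
      have hlt := pre_last_zero m hPre
      have hLm : 1 ≤ (stkOf m).length := by omega
      have hstk' : stkOf (m ++ [0]) = (stkOf m).dropLast := by simpa using hstk
      have hc : (m ++ [0]).count 0 = m.count 0 + 1 := by
        simp [List.count_append]
      constructor
      · rw [hstk', List.length_dropLast, hc, hl]
        omega
      · intro t p
        rw [List.foldr_append]
        simp only [List.foldr_cons, List.foldr_nil, if_true]
        have hcast : (p : Int) + 1 = ((p + 1 : Nat) : Int) := by push_cast; ring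
        rw [hcast, ihscan t (p + 1), hstk']
        simp only [Prod.mk.injEq]
        constructor
        · have h1 : (stkOf m).dropLast.length - p = (stkOf m).length - (p + 1) := by
            rw [List.length_dropLast]; omega
          rw [h1, List.dropLast_eq_take, List.take_take]
          have hmin : min ((stkOf m).length - (p + 1)) ((stkOf m).length - 1)
              = (stkOf m).length - (p + 1) := by omega
          rw [hmin]
        · rw [List.length_dropLast]
          congr 1
          omega
    · -- nonzero: stack pushes; scan either cancels it or adds it
      have hstk' : stkOf (m ++ [a]) = stkOf m ++ [a] := by simpa [ha] using hstk
      have hc : (m ++ [a]).count 0 = m.count 0 := by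
        simp only [List.count_append, List.count_cons, List.count_nil]
        simp [ha]
      constructor
      · rw [hstk', hc, hl]
        simp only [List.length_append, List.length_cons, List.length_nil]
        omega
      · intro t p
        rw [List.foldr_append]
        simp only [List.foldr_cons, List.foldr_nil, if_neg ha]
        cases p with
        | zero =>
          simp only [Nat.cast_zero, ne_eq, not_true_eq_false, if_false]
          have h0 := ihscan (t + a) 0
          simp only [Nat.cast_zero] at h0
          rw [h0, hstk']
          simp only [Prod.mk.injEq]
          constructor
          · simp only [Nat.sub_zero]
            rw [List.take_length, List.take_length]
            simp [List.sum_append]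
            ring
          · simp
        | succ q =>
          have hne : ((q + 1 : Nat) : Int) ≠ 0 := by push_cast; omega
          simp only [if_pos hne]
          have hcast : ((q + 1 : Nat) : Int) - 1 = ((q : Nat) : Int) := by push_cast; ring
          rw [hcast, ihscan t q, hstk']
          simp only [Prod.mk.injEq, List.length_append, List.length_cons, List.length_nil]
          constructor
          · by_cases hq : q ≤ (stkOf m).length
            · have h1 : (stkOf m).length + (0 + 1) - (q + 1) = (stkOf m).length - q := by omega
              rw [h1, List.take_append_of_le_length (by omega)]
            · have h1 : (stkOf m).length + (0 + 1) - (q + 1) = 0 := by omega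
              have h2 : (stkOf m).length - q = 0 := by omega
              rw [h1, h2]
              simp
          · congr 1
            omega

-- ===== VERDICT (by name: the statement is the Claim_ definition above) =====
theorem jaemin_spec : Claim_equal_jaemin := by
  intro numbers _ hPre
  unfold Spec_jaemin jaemin_alt
  rw [List.foldl_reverse]
  have h := (main_inv numbers hPre).2 0 0
  have h2 := congrArg Prod.fst h
  simp only [Nat.cast_zero, Nat.sub_zero, List.take_length, zero_add] at h2
  rw [jaemin_eq_sum]
  exact h2.symm
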